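-- pv_equiv track=rewrite | github.com/mitre/hipcheck | sdk/python/src/hipcheck_sdk/chunk.py | drain_vec_string
-- ===== SOURCE A (Python) =====
-- from typing import List, Optional, Tuple
--
-- def drain_at_most_n_bytes(buf: str, max_bytes: int) -> Tuple[str, Optional[str]]:
--     buf_bytes = [x.encode("utf-8") for x in buf]
--     buf_len = sum([len(x) for x in buf_bytes])
--
--     to_drain = min(buf_len, max_bytes)
--     if buf_len <= to_drain:
--         return (buf, None)
--     accum = 0
--     for i in range(0, len(buf_bytes)):
--         accum += len(buf_bytes[i])
--         if accum > to_drain: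
--             break
--     drained_portion = buf[0:i]
--     remainder = buf[i:]
--     return (drained_portion, remainder)
--
-- def drain_vec_string(
--     source: List[str], sink: List[str], remaining: int, made_progress: bool
-- ) -> Tuple[bool, bool]:
--     while len(source) > 0:
--         s_to_drain = source.pop(0)
--         drained_portion, remainder = drain_at_most_n_bytes(s_to_drain, remaining)
--         if remainder is None:
--             made_progress = True
--             remaining -= len(drained_portion.encode("utf-8"))
--             sink.append(drained_portion)
--         else:
--             # if any amount was drained, then a split was required
--             split = len(drained_portion) > 0
--             if split:
--                 made_progress = True
--                 remaining -= len(drained_portion.encode("utf-8"))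
--                 sink.append(drained_portion)
--             # since the string being processed was pulled from the front via `source.remove(0)`,
--             # source.insert(0,...) needs to be used to maintain ordering
--             source.insert(0, remainder)
--             return (made_progress, split)
--     return (made_progress, False)
-- ===== SOURCE B (Python) =====
-- from typing import List, Tuple
--
-- def drain_vec_string(
--     source: List[str], sink: List[str], remaining: int, made_progress: bool
-- ) -> Tuple[bool, bool]:
--     # Prefix-sum + binary-search decomposition: compute cumulative byte lengths,
--     # binary-search the number k of leading strings that fit whole, then split the
--     # single boundary string char by char against the leftover budget.
--     byte_lens = [len(s.encode("utf-8")) for s in source]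
--     cum = []
--     total = 0
--     for b in byte_lens:
--         total += b
--         cum.append(total)
--     lo, hi = 0, len(cum)
--     while lo < hi:
--         mid = (lo + hi) // 2
--         if cum[mid] <= remaining:
--             lo = mid + 1
--         else:
--             hi = mid
--     k = lo
--     drained_bytes = cum[k - 1] if k > 0 else 0
--     sink.extend(source[:k])
--     made_progress = made_progress or k > 0
--     if k == len(source):
--         del source[:]
--         return (made_progress, False)
--     leftover = remaining - drained_bytes
--     boundary = source[k]
--     acc = 0
--     p = 0
--     for ch in boundary:
--         b = len(ch.encode("utf-8"))
--         if acc + b > leftover: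
--             break
--         acc += b
--         p += 1
--     split = p > 0
--     if split:
--         sink.append(boundary[:p])
--         made_progress = True
--     source[: k + 1] = [boundary[p:]]
--     return (made_progress, split)
-- ===== Notes on version B (the rewrite author's own statement) =====
-- stated objective: faster
-- what changed: Replaces A's destructive pop(0)/insert(0) loop with per-char byte re-encoding by a prefix-sum table of byte lengths, a hand-written binary search for the number k of fully-fitting leading strings, and a single char-level split of the one boundary string; equivalence is about the return value, but B also performs the same list mutations as A.
-- crash fix: When remaining < 0 and the first string of source is empty, A's inner for-loop never runs and A raises NameError on the unbound loop index; B returns (made_progress, False) with source unchanged. — e.g. on drain_vec_string([""], [], -1, false): A raises UnboundLocalError, B returns (false, false)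
import Mathlib
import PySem

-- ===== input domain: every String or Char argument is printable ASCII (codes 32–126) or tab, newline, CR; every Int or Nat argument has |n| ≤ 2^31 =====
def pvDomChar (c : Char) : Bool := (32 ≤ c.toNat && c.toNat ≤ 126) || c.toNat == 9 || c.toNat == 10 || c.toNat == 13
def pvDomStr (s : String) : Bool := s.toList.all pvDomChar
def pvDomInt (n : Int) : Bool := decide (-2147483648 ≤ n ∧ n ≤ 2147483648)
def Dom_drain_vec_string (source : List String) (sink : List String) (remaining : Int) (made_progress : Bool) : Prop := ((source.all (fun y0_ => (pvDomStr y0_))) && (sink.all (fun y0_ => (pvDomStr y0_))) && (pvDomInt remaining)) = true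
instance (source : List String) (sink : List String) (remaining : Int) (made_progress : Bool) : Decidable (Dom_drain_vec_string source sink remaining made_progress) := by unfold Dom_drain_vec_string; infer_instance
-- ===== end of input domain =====

-- B replaces A's pop(0)/insert(0) loop with per-char re-encoding by a prefix-sum table of
-- byte lengths, a binary search for the fully-fitting prefix, and one char-level boundary
-- split (objective: faster). Both Pythons mutate source/sink identically; the equivalence
-- proved here is about the RETURN value only.

-- ===== PORT A =====
-- len(c.encode("utf-8")) for a single character (exact UTF-8 byte count)
def pvCharBytes (c : Char) : Int :=
  if c.toNat < 0x80 then 1 else if c.toNat < 0x800 then 2 else if c.toNat < 0x10000 then 3 else 4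

-- len(s.encode("utf-8")) = sum([len(x) for x in [c.encode("utf-8") for c in s]])
def pvBytesLen (s : String) : Int := (s.toList.map pvCharBytes).sum

-- A's inner `for i in range(0, len(buf_bytes)): accum += len(buf_bytes[i]); if accum > to_drain: break`,
-- returning the final value of i.  The [] case is Python's unbound/stale `i` (a NameError for an
-- initially empty buf); that case is unreachable under Pre_ (the break always fires before the end).
def pvAFind (lens : List Int) (to_drain accum : Int) (i : Nat) : Nat :=
  match lens with
  | [] => i - 1
  | l :: rest =>
    let accum' := accum + l
    if accum' > to_drain then i else pvAFind rest to_drain accum' (i + 1)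

-- literal port of drain_at_most_n_bytes (buf[0:i]/buf[i:] with 0 ≤ i ≤ len are take/drop on toList)
def pvDrainAtMost (buf : String) (max_bytes : Int) : String × Option String :=
  let lens := buf.toList.map pvCharBytes
  let buf_len := lens.sum
  let to_drain := min buf_len max_bytes
  if buf_len ≤ to_drain then (buf, none)
  else
    let i := pvAFind lens to_drain 0 0
    (String.ofList (buf.toList.take i), some (String.ofList (buf.toList.drop i)))

-- the while-loop of A: state is (source, remaining, made_progress); sink.append does not
-- affect the returned pair
def pvGoA : List String → Int → Bool → Bool × Bool
  | [], _, made_progress => (made_progress, false)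
  | s :: rest, remaining, made_progress =>
    match pvDrainAtMost s remaining with
    | (d, none) => pvGoA rest (remaining - pvBytesLen d) true
    | (d, some _) =>
      let split := decide (0 < d.toList.length)
      (made_progress || split, split)

def drain_vec_string (source : List String) (_sink : List String) (remaining : Int) (made_progress : Bool) : Bool × Bool :=
  pvGoA source remaining made_progress

-- ===== PORT B =====
-- the running-total loop building cum
def pvCum : List Int → Int → List Int
  | [], _ => []
  | b :: rest, total => (total + b) :: pvCum rest (total + b)

-- B's hand-written binary search `while lo < hi: ...`; the fuel argument (hi - lo strictly
-- decreases) only makes the same computation total; (lo + hi) // 2 on Nat is exact here since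
-- lo, hi ≥ 0
def pvBisectAux : Nat → List Int → Int → Nat → Nat → Nat
  | 0, _, _, lo, _ => lo
  | fuel + 1, cum, remaining, lo, hi =>
    if lo < hi then
      let mid := (lo + hi) / 2
      if cum.getD mid 0 ≤ remaining then pvBisectAux fuel cum remaining (mid + 1) hi
      else pvBisectAux fuel cum remaining lo mid
    else lo

def pvBisect (cum : List Int) (remaining : Int) (lo hi : Nat) : Nat :=
  pvBisectAux (hi - lo) cum remaining lo hi

-- B's char loop over the boundary string: p = number of leading chars whose bytes fit
def pvTakeChars : List Char → Int → Int → Nat → Nat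
  | [], _, _, p => p
  | c :: rest, leftover, acc, p =>
    let b := pvCharBytes c
    if acc + b > leftover then p else pvTakeChars rest leftover (acc + b) (p + 1)

def drain_vec_string_alt (source : List String) (_sink : List String) (remaining : Int) (made_progress : Bool) : Bool × Bool :=
  let byte_lens := source.map pvBytesLen
  let cum := pvCum byte_lens 0
  let k := pvBisect cum remaining 0 cum.length
  let drained_bytes := if 0 < k then cum.getD (k - 1) 0 else 0
  let mp := made_progress || decide (0 < k)
  if k = source.length then (mp, false)
  else
    let leftover := remaining - drained_bytes
    let boundary := source.getD k ""
    let p := pvTakeChars boundary.toList leftover 0 0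
    let split := decide (0 < p)
    (mp || split, split)

-- ===== PRECONDITION & SPEC =====
-- Pre_ excludes exactly the inputs on which A raises NameError (remaining < 0 with an empty
-- first string: the inner for-loop body never runs and its index `i` is unbound).
def Pre_drain_vec_string (source : List String) (sink : List String) (remaining : Int) (made_progress : Bool) : Prop :=
  ¬ (remaining < 0 ∧ source.head? = some "")
instance (source : List String) (sink : List String) (remaining : Int) (made_progress : Bool) : Decidable (Pre_drain_vec_string source sink remaining made_progress) := by unfold Pre_drain_vec_string; infer_instance

def pvWitness_drain_vec_string : List String × List String × Int × Bool := (["ab", "cd"], [], 3, false)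

-- When remaining < 0 and the first string of source is empty, A raises NameError (unbound
-- loop index); B returns (made_progress, False).
def Raises_drain_vec_string (source : List String) (sink : List String) (remaining : Int) (made_progress : Bool) : Prop :=
  remaining < 0 ∧ source.head? = some ""
instance (source : List String) (sink : List String) (remaining : Int) (made_progress : Bool) : Decidable (Raises_drain_vec_string source sink remaining made_progress) := by unfold Raises_drain_vec_string; infer_instance
def pvRaiseWitness_drain_vec_string : List String × List String × Int × Bool := ([""], [], -1, false)
def pvRaiseWitnessOut_drain_vec_string : Bool × Bool := (false, false)

def Spec_drain_vec_string (source : List String) (sink : List String) (remaining : Int) (made_progress : Bool) (out : Bool × Bool) : Prop := out = drain_vec_string_alt source sink remaining made_progress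
instance (source : List String) (sink : List String) (remaining : Int) (made_progress : Bool) (out : Bool × Bool) : Decidable (Spec_drain_vec_string source sink remaining made_progress out) := by unfold Spec_drain_vec_string; infer_instance

-- ===== CLAIM (what is proved, stated in full; the proofs are below) =====
def Claim_equal_drain_vec_string : Prop := ∀ (source : List String) (sink : List String) (remaining : Int) (made_progress : Bool), Dom_drain_vec_string source sink remaining made_progress → Pre_drain_vec_string source sink remaining made_progress → Spec_drain_vec_string source sink remaining made_progress (drain_vec_string source sink remaining made_progress)

def Claim_raises_drain_vec_string : Prop := (∀ (source : List String) (sink : List String) (remaining : Int) (made_progress : Bool), Dom_drain_vec_string source sink remaining made_progress → Raises_drain_vec_string source sink remaining made_progress → ¬ Pre_drain_vec_string source sink remaining made_progress) ∧ (Dom_drain_vec_string (pvRaiseWitness_drain_vec_string.1) (pvRaiseWitness_drain_vec_string.2.1) (pvRaiseWitness_drain_vec_string.2.2.1) (pvRaiseWitness_drain_vec_string.2.2.2) ∧ Raises_drain_vec_string (pvRaiseWitness_drain_vec_string.1) (pvRaiseWitness_drain_vec_string.2.1) (pvRaiseWitness_drain_vec_string.2.2.1) (pvRaiseWitness_drain_vec_string.2.2.2)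 ∧ drain_vec_string_alt (pvRaiseWitness_drain_vec_string.1) (pvRaiseWitness_drain_vec_string.2.1) (pvRaiseWitness_drain_vec_string.2.2.1) (pvRaiseWitness_drain_vec_string.2.2.2) = pvRaiseWitnessOut_drain_vec_string)

-- ===== LEMMAS AND PROOFS =====

-- number of leading entries of c that are ≤ x (B's binary search computes this)
def pvCountLe (c : List Int) (x : Int) : Nat := (c.takeWhile (fun v => decide (v ≤ x))).length

-- proof-side restatement of drain_vec_string_alt with the binary search replaced by pvCountLe
def pvAltSpec (source : List String) (remaining : Int) (made_progress : Bool) : Bool × Bool :=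
  let cum := pvCum (source.map pvBytesLen) 0
  let k := pvCountLe cum remaining
  let drained_bytes := if 0 < k then cum.getD (k - 1) 0 else 0
  let mp := made_progress || decide (0 < k)
  if k = source.length then (mp, false)
  else
    let leftover := remaining - drained_bytes
    let boundary := source.getD k ""
    let p := pvTakeChars boundary.toList leftover 0 0
    let split := decide (0 < p)
    (mp || split, split)

theorem pvCharBytes_pos (c : Char) : 0 < pvCharBytes c := by
  unfold pvCharBytes; split_ifs <;> norm_num

theorem pvBytesLen_nonneg (s : String) : 0 ≤ pvBytesLen s := by
  unfold pvBytesLen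
  apply List.sum_nonneg
  intro a ha
  obtain ⟨c, _, rfl⟩ := List.mem_map.1 ha
  exact le_of_lt (pvCharBytes_pos c)

theorem pvCountLe_nil (x : Int) : pvCountLe [] x = 0 := rfl

theorem pvCountLe_cons (a : Int) (c : List Int) (x : Int) :
    pvCountLe (a :: c) x = if a ≤ x then pvCountLe c x + 1 else 0 := by
  unfold pvCountLe
  by_cases h : a ≤ x <;> simp [h, Nat.add_comm]

theorem pvCountLe_le (c : List Int) (x : Int) : pvCountLe c x ≤ c.length := by
  unfold pvCountLe
  exact (List.takeWhile_sublist _).length_le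

theorem pvCountLe_getD_le (c : List Int) (x : Int) : ∀ (i : Nat), i < pvCountLe c x →
    c.getD i 0 ≤ x := by
  induction c with
  | nil => intro i hi; simp [pvCountLe_nil] at hi
  | cons a c ih =>
    intro i hi
    rw [pvCountLe_cons] at hi
    by_cases ha : a ≤ x
    · simp only [ha, if_true] at hi
      cases i with
      | zero => simpa using ha
      | succ i => simpa using ih i (by omega)
    · simp [ha] at hi

theorem pvCountLe_getD_gt (c : List Int) (x : Int) : pvCountLe c x < c.length →
    x < c.getD (pvCountLe c x) 0 := by
  induction c with
  | nil => intro h; simp [pvCountLe_nil] at h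
  | cons a c ih =>
    intro h
    rw [pvCountLe_cons] at h ⊢
    by_cases ha : a ≤ x
    · simp only [ha, if_true] at h ⊢
      simpa using ih (by simpa using h)
    · simp [ha]; omega

-- binary-search correctness over a nondecreasing list
theorem pvBisectAux_eq (c : List Int) (x : Int)
    (hmono : ∀ i j, i ≤ j → j < c.length → c.getD i 0 ≤ c.getD j 0) :
    ∀ fuel lo hi, hi - lo ≤ fuel → lo ≤ hi → hi ≤ c.length →
    (∀ i, i < lo → c.getD i 0 ≤ x) →
    (∀ j, hi ≤ j → j < c.length → x < c.getD j 0) →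
    pvBisectAux fuel c x lo hi = pvCountLe c x := by
  intro fuel
  induction fuel with
  | zero =>
    intro lo hi hfuel hlh hhl hlo hhi
    have hloeq : lo = hi := by omega
    simp only [pvBisectAux]
    have h1 : lo ≤ pvCountLe c x := by
      by_contra hcon
      push_neg at hcon
      have h2 := pvCountLe_getD_gt c x (by omega)
      have h3 := hlo _ hcon
      omega
    have h2 : pvCountLe c x ≤ lo := by
      by_contra hcon
      push_neg at hcon
      have h3 := pvCountLe_getD_le c x lo hcon
      have h4 : pvCountLe c x ≤ c.length := pvCountLe_le c x
      have h5 := hhi lo (by omega) (by omega)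
      omega
    omega
  | succ fuel ih =>
    intro lo hi hfuel hlh hhl hlo hhi
    simp only [pvBisectAux]
    by_cases hlt : lo < hi
    · simp only [hlt, if_true]
      by_cases hc : c.getD ((lo + hi) / 2) 0 ≤ x
      · simp only [hc, if_true]
        refine ih ((lo + hi) / 2 + 1) hi (by omega) (by omega) hhl ?_ hhi
        intro i hi2
        calc c.getD i 0 ≤ c.getD ((lo + hi) / 2) 0 :=
              hmono i _ (by omega) (by omega)
          _ ≤ x := hc
      · simp only [hc, if_false]
        refine ih lo ((lo + hi) / 2) (by omega) (by omega) (by omega) hlo ?_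
        intro j hj1 hj2
        push_neg at hc
        calc x < c.getD ((lo + hi) / 2) 0 := hc
          _ ≤ c.getD j 0 := hmono _ j hj1 hj2
    · simp only [hlt, if_false]
      have hloeq : lo = hi := by omega
      have h1 : lo ≤ pvCountLe c x := by
        by_contra hcon
        push_neg at hcon
        have h2 := pvCountLe_getD_gt c x (by omega)
        have h3 := hlo _ hcon
        omega
      have h2 : pvCountLe c x ≤ lo := by
        by_contra hcon
        push_neg at hcon
        have h3 := pvCountLe_getD_le c x lo hcon
        have h4 : pvCountLe c x ≤ c.length := pvCountLe_le c x
        have h5 := hhi lo (by omega) (by omega)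
        omega
      omega

theorem pvBisect_eq (c : List Int) (x : Int)
    (hmono : ∀ i j, i ≤ j → j < c.length → c.getD i 0 ≤ c.getD j 0) :
    pvBisect c x 0 c.length = pvCountLe c x := by
  exact pvBisectAux_eq c x hmono _ 0 c.length (by omega) (by omega) le_rfl
    (by omega) (by omega)

theorem pvCum_length (l : List Int) (t : Int) : (pvCum l t).length = l.length := by
  induction l generalizing t with
  | nil => rfl
  | cons b rest ih => simp [pvCum, ih]

theorem pvCum_getD (l : List Int) (t : Int) (i : Nat) (hi : i < l.length) :
    (pvCum l t).getD i 0 = t + (l.take (i + 1)).sum := by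
  induction l generalizing t i with
  | nil => simp at hi
  | cons b rest ih =>
    cases i with
    | zero => simp [pvCum]
    | succ i =>
      simp only [pvCum, List.getD_cons_succ]
      rw [ih _ _ (by simpa using hi)]
      simp [List.take_succ_cons]
      ring

theorem pvCum_mono (l : List Int) (hl : ∀ a ∈ l, 0 ≤ a) :
    ∀ i j, i ≤ j → j < (pvCum l 0).length → (pvCum l 0).getD i 0 ≤ (pvCum l 0).getD j 0 := by
  intro i j hij hj
  rw [pvCum_length] at hj
  rw [pvCum_getD l 0 i (by omega), pvCum_getD l 0 j hj]
  have hsplit : l.take (j + 1) = l.take (i + 1) ++ (l.drop (i + 1)).take (j + 1 - (i + 1)) := by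
    rw [← List.take_add]
    congr 1
    omega
  rw [hsplit, List.sum_append]
  have : 0 ≤ ((l.drop (i + 1)).take (j + 1 - (i + 1))).sum := by
    apply List.sum_nonneg
    intro a ha
    exact hl a (List.mem_of_mem_drop (List.mem_of_mem_take ha))
  omega

theorem pvCum_shift (l : List Int) (t : Int) : pvCum l t = (pvCum l 0).map (t + ·) := by
  induction l generalizing t with
  | nil => rfl
  | cons b rest ih =>
    simp only [pvCum, List.map_cons, zero_add]
    congr 1
    rw [ih (t + b), ih b, List.map_map]
    congr 1
    funext v
    simp [add_assoc]

-- drain_vec_string_alt computes pvAltSpec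
theorem alt_eq_altSpec (source sink : List String) (remaining : Int) (mp : Bool) :
    drain_vec_string_alt source sink remaining mp = pvAltSpec source remaining mp := by
  have hmono := pvCum_mono (source.map pvBytesLen) (by
    intro a ha
    obtain ⟨s, _, rfl⟩ := List.mem_map.1 ha
    exact pvBytesLen_nonneg s)
  have hb := pvBisect_eq (pvCum (source.map pvBytesLen) 0) remaining hmono
  simp only [drain_vec_string_alt, pvAltSpec, hb]

-- the inner break-index of A equals B's boundary char count
theorem pvAFind_eq_pvTakeChars : ∀ (cs : List Char) (td acc : Int) (p : Nat), cs ≠ [] →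
    td < acc + (cs.map pvCharBytes).sum →
    pvAFind (cs.map pvCharBytes) td acc p = pvTakeChars cs td acc p := by
  intro cs
  induction cs with
  | nil => intro td acc p hne _; exact absurd rfl hne
  | cons ch rest ih =>
    intro td acc p _ hlt
    simp only [List.map_cons, pvAFind, pvTakeChars]
    by_cases hb : acc + pvCharBytes ch > td
    · simp [hb]
    · simp only [hb, if_false]
      cases rest with
      | nil => simp at hlt; omega
      | cons c2 r2 =>
        apply ih _ _ _ (by simp) ?_
        simp only [List.map_cons, List.sum_cons] at hlt ⊢
        omega

theorem pvTakeChars_le : ∀ (cs : List Char) (lo acc : Int) (p : Nat),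
    pvTakeChars cs lo acc p ≤ p + cs.length := by
  intro cs
  induction cs with
  | nil => intro lo acc p; simp [pvTakeChars]
  | cons c rest ih =>
    intro lo acc p
    simp only [pvTakeChars, List.length_cons]
    by_cases hb : acc + pvCharBytes c > lo
    · simp [hb]
    · simp only [hb, if_false]
      have := ih lo (acc + pvCharBytes c) (p + 1)
      omega

-- step lemmas for pvAltSpec
theorem pvCountLe_map_add (L : Int) (c : List Int) (r : Int) :
    pvCountLe (c.map (L + ·)) r = pvCountLe c (r - L) := by
  unfold pvCountLe
  rw [List.takeWhile_map, List.length_map]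
  have hp : ((fun v : Int => decide (v ≤ r)) ∘ (L + ·)) = (fun v : Int => decide (v ≤ r - L)) := by
    funext v
    rw [Function.comp_apply, decide_eq_decide]
    omega
  rw [hp]

theorem getD_map_add (L : Int) (c : List Int) (i : Nat) (hi : i < c.length) :
    (c.map (L + ·)).getD i 0 = L + c.getD i 0 := by
  rw [List.getD_eq_getElem _ _ (by simpa using hi), List.getD_eq_getElem _ _ hi, List.getElem_map]

theorem pvAltSpec_nil (r : Int) (mp : Bool) : pvAltSpec [] r mp = (mp, false) := by
  simp [pvAltSpec, pvCum, pvCountLe]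

theorem pvAltSpec_cons_fits (s : String) (rest : List String) (r : Int) (mp : Bool)
    (h : pvBytesLen s ≤ r) :
    pvAltSpec (s :: rest) r mp = pvAltSpec rest (r - pvBytesLen s) true := by
  have hcum : pvCum ((s :: rest).map pvBytesLen) 0 =
      pvBytesLen s :: (pvCum (rest.map pvBytesLen) 0).map (pvBytesLen s + ·) := by
    simp only [List.map_cons, pvCum, zero_add]
    rw [pvCum_shift]
  have hk : pvCountLe (pvBytesLen s :: (pvCum (rest.map pvBytesLen) 0).map (pvBytesLen s + ·)) r =
      pvCountLe (pvCum (rest.map pvBytesLen) 0) (r - pvBytesLen s) + 1 := by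
    rw [pvCountLe_cons, if_pos h, pvCountLe_map_add]
  have hlen' : (pvCum (rest.map pvBytesLen) 0).length = rest.length := by
    rw [pvCum_length, List.length_map]
  have hk'le : pvCountLe (pvCum (rest.map pvBytesLen) 0) (r - pvBytesLen s) ≤ rest.length :=
    hlen' ▸ pvCountLe_le _ _
  simp only [pvAltSpec, hcum, hk, List.length_cons]
  generalize hg : pvCountLe (pvCum (List.map pvBytesLen rest) 0) (r - pvBytesLen s) = k' at hk'le ⊢
  by_cases hkl : k' = rest.length
  · simp [hkl]
  · have h1 : ¬ (k' + 1 = rest.length + 1) := by omega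
    rcases Nat.eq_zero_or_pos k' with h0 | hpos
    · subst h0
      simp [hkl]
      all_goals (rintro rfl; exact (hkl rfl).elim)
    · obtain ⟨k'', rfl⟩ : ∃ k'', k' = k'' + 1 := ⟨k' - 1, by omega⟩
      have hk'' : k'' < (pvCum (rest.map pvBytesLen) 0).length := by omega
      simp only [h1, if_false, hkl, if_false, Nat.add_sub_cancel, List.getD_cons_succ,
        getD_map_add _ _ _ hk'', Nat.succ_pos, if_pos, decide_true, Bool.or_true, Bool.true_or,
        sub_sub]

theorem pvAltSpec_cons_split (s : String) (rest : List String) (r : Int) (mp : Bool)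
    (h : r < pvBytesLen s) :
    pvAltSpec (s :: rest) r mp =
      (mp || decide (0 < pvTakeChars s.toList r 0 0), decide (0 < pvTakeChars s.toList r 0 0)) := by
  have hcum : pvCum ((s :: rest).map pvBytesLen) 0 =
      pvBytesLen s :: (pvCum (rest.map pvBytesLen) 0).map (pvBytesLen s + ·) := by
    simp only [List.map_cons, pvCum, zero_add]
    rw [pvCum_shift]
  have hk0 : pvCountLe (pvBytesLen s :: (pvCum (rest.map pvBytesLen) 0).map (pvBytesLen s + ·)) r
      = 0 := by
    rw [pvCountLe_cons, if_neg (not_le.2 h)]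
  simp only [pvAltSpec, hcum, hk0]
  simp

theorem goA_eq_altSpec : ∀ (source : List String) (r : Int) (mp : Bool),
    pvGoA source r mp = pvAltSpec source r mp := by
  intro source
  induction source with
  | nil => intro r mp; simp [pvGoA, pvAltSpec_nil]
  | cons s rest ih =>
    intro r mp
    by_cases hfit : pvBytesLen s ≤ r
    · have hfit' : (s.toList.map pvCharBytes).sum ≤ r := hfit
      have hd : pvDrainAtMost s r = (s, none) := by
        simp only [pvDrainAtMost]
        rw [if_pos (le_min le_rfl hfit')]
      simp only [pvGoA, hd]
      rw [ih, pvAltSpec_cons_fits s rest r mp hfit]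
    · have hlt : r < pvBytesLen s := not_le.1 hfit
      have hlt' : r < (s.toList.map pvCharBytes).sum := hlt
      have hmin : min ((s.toList.map pvCharBytes).sum) r = r := min_eq_right (le_of_lt hlt')
      have hd : pvDrainAtMost s r =
          (String.ofList (s.toList.take (pvAFind (s.toList.map pvCharBytes) r 0 0)),
           some (String.ofList (s.toList.drop (pvAFind (s.toList.map pvCharBytes) r 0 0)))) := by
        simp only [pvDrainAtMost, hmin]
        rw [if_neg (not_le.2 hlt')]
      simp only [pvGoA, hd]
      rw [pvAltSpec_cons_split s rest r mp hlt]
      rcases heq : s.toList with _ | ⟨c, cs⟩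
      · simp [pvAFind, pvTakeChars]
      · have hlt2 : r < 0 + ((c :: cs).map pvCharBytes).sum := by
          rw [← heq]
          simpa using hlt'
        have hi2 : pvAFind ((c :: cs).map pvCharBytes) r 0 0 = pvTakeChars (c :: cs) r 0 0 :=
          pvAFind_eq_pvTakeChars (c :: cs) r 0 0 (by simp) hlt2
        have hp2 := pvTakeChars_le (c :: cs) r 0 0
        have hb2 : decide (0 < min (pvTakeChars (c :: cs) r 0 0) (c :: cs).length)
            = decide (0 < pvTakeChars (c :: cs) r 0 0) := by
          rw [decide_eq_decide]
          simp only [List.length_cons] at hp2 ⊢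
          omega
        simp only [String.toList_ofList, List.length_take, hi2, hb2]

-- ===== VERDICT (by name: the statement is the Claim_ definition above) =====
theorem drain_vec_string_spec : Claim_equal_drain_vec_string := by
  intro source sink remaining made_progress _ _
  unfold Spec_drain_vec_string drain_vec_string
  rw [alt_eq_altSpec, goA_eq_altSpec]

theorem drain_vec_string_raises : Claim_raises_drain_vec_string := by
  unfold Claim_raises_drain_vec_string
  exact ⟨fun _ _ _ _ _ hr hp => hp hr, by decide⟩

-- B's value at the raise witness, extracted from the theorem above in plain literals
theorem pvRaiseOut_ok : drain_vec_string_alt [""] [] (-1) false = (false, false) :=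
  drain_vec_string_raises.2.2.2
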